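-- pv_equiv track=rewrite | github.com/mmerkulov/PythonAlgorithm | lesson2/task5.py | show_ascii
-- ===== SOURCE A (Python) =====
-- def show_ascii(text='', num=32, i=0):
--     if num == 127:
--         return text
--     else:
--         if i == 10:
--             i = 0
--             return show_ascii(text + '\n', num + 1, i + 1)
--         else:
--             return show_ascii(text + str(num) + '-' + chr(num) + ' ', num + 1, i + 1)
-- ===== SOURCE B (Python) =====
-- def show_ascii(text='', num=32, i=0):
--     parts = [text]
--     for n in range(num, 127):
--         if i == 10:
--             parts.append('\n')
--             i = 1
--         else:
--             parts.append(str(n) + '-' + chr(n) + ' ')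
--             i += 1
--     return ''.join(parts)
-- ===== Notes on version B (the rewrite author's own statement) =====
-- stated objective: idiomatic
-- what changed: A's tail recursion threading (text,num,i) is replaced by a flat for-loop over range(num,127) that collects the chunks in a list and joins them once.
import Mathlib
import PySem

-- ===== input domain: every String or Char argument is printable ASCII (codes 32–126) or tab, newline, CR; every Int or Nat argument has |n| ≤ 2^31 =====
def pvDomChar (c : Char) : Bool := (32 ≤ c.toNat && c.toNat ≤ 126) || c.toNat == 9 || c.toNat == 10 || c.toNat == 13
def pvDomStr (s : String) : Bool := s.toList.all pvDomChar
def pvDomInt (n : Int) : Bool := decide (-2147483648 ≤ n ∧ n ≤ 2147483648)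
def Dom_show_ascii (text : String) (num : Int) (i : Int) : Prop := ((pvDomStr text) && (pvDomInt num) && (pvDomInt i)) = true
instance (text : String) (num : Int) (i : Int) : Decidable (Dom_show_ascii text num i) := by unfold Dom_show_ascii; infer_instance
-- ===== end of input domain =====

-- B replaces A's tail recursion by an idiomatic for-loop over range(num, 127) collecting
-- chunks in a list joined once; equal cost, no speed claim.

-- shared primitive: Python's chr(n); exact for 0 ≤ n < 0x110000 (Python chr raises
-- ValueError outside that, excluded by Pre_show_ascii)
def pyChr (n : Int) : String := String.ofList [Char.ofNat n.toNat]

-- ===== PORT A =====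
def show_ascii (text : String) (num : Int) (i : Int) : String :=
  if num = 127 then text
  else if 127 < num then text -- totality guard only: the Python recurses forever here (RecursionError), outside Pre_
  else if i = 10 then show_ascii (text ++ "\n") (num + 1) (0 + 1)
  else show_ascii (text ++ PySem.Int.toStr num ++ "-" ++ pyChr num ++ " ") (num + 1) (i + 1)
termination_by (127 - num).toNat
decreasing_by all_goals omega

-- ===== PORT B =====
def show_ascii_alt (text : String) (num : Int) (i : Int) : String :=
  let res := (PySem.List.pyRange num 127 1).foldl
    (fun (st : List String × Int) n =>
      if st.2 = 10 then (st.1 ++ ["\n"], 1)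
      else (st.1 ++ [PySem.Int.toStr n ++ "-" ++ pyChr n ++ " "], st.2 + 1))
    ([text], i)
  PySem.Str.join "" res.1

-- ===== PRECONDITION & SPEC =====
-- Pre_ excludes exactly the inputs where the Python A raises: num > 127 (unbounded recursion,
-- RecursionError) and negative num (chr raises ValueError), except the one returning corner
-- num = -1 ∧ i = 10 (the newline branch skips that num), which is kept inside.
def Pre_show_ascii (text : String) (num : Int) (i : Int) : Prop :=
  num ≤ 127 ∧ (0 ≤ num ∨ (num = -1 ∧ i = 10))
instance (text : String) (num : Int) (i : Int) : Decidable (Pre_show_ascii text num i) := by unfold Pre_show_ascii; infer_instance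

def pvWitness_show_ascii : String × Int × Int := ("", 32, 0)

def Spec_show_ascii (text : String) (num : Int) (i : Int) (out : String) : Prop := out = show_ascii_alt text num i
instance (text : String) (num : Int) (i : Int) (out : String) : Decidable (Spec_show_ascii text num i out) := by unfold Spec_show_ascii; infer_instance

-- ===== CLAIM (what is proved, stated in full; the proofs are below) =====
def Claim_equal_show_ascii : Prop := ∀ (text : String) (num : Int) (i : Int), Dom_show_ascii text num i → Pre_show_ascii text num i → Spec_show_ascii text num i (show_ascii text num i)

-- ===== LEMMAS AND PROOFS =====

-- B's loop body, named for the proofs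
def pvStep (st : List String × Int) (n : Int) : List String × Int :=
  if st.2 = 10 then (st.1 ++ ["\n"], 1)
  else (st.1 ++ [PySem.Int.toStr n ++ "-" ++ pyChr n ++ " "], st.2 + 1)

lemma pvFoldl_acc (l : List Int) (p1 p2 : List String) (i : Int) :
    l.foldl pvStep (p1 ++ p2, i) =
      (p1 ++ (l.foldl pvStep (p2, i)).1, (l.foldl pvStep (p2, i)).2) := by
  induction l generalizing p2 i with
  | nil => simp
  | cons n rest ih =>
    simp only [List.foldl_cons, pvStep]
    by_cases h : i = 10 <;> simp [h, ih, List.append_assoc]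

lemma pvJoin_nil : PySem.Str.join "" ([] : List String) = "" := by decide

lemma pvJoin_cons (s : String) (rest : List String) :
    PySem.Str.join "" (s :: rest) = s ++ PySem.Str.join "" rest := by
  apply String.ext
  cases rest with
  | nil => simp [PySem.Str.toList_join, PySem.Chars.join_singleton, PySem.Chars.join_nil]
  | cons b t => simp [PySem.Str.toList_join, PySem.Chars.join_cons_cons]

lemma pvMain (fuel : Nat) (num : Int) (hf : (127 - num).toNat ≤ fuel) (h : num ≤ 127) (text : String) (i : Int) :
    show_ascii text num i =
      text ++ PySem.Str.join "" (((PySem.List.pyRange num 127 1).foldl pvStep ([], i)).1) := by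
  induction fuel generalizing num text i with
  | zero =>
    have hn : num = 127 := by omega
    subst hn
    rw [show_ascii]
    simp [PySem.List.pyRange_one_eq_nil (by omega : (127:Int) ≤ 127), pvJoin_nil]
  | succ k ih =>
    by_cases hn : num = 127
    · subst hn
      rw [show_ascii]
      simp [PySem.List.pyRange_one_eq_nil (by omega : (127:Int) ≤ 127), pvJoin_nil]
    · have hlt : num < 127 := by omega
      rw [PySem.List.pyRange_one_cons (by omega : num < 127)]
      rw [show_ascii]
      simp only [hn, if_false, if_neg (by omega : ¬ 127 < num)]
      by_cases hi : i = 10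
      · rw [if_pos hi]
        rw [ih (num + 1) (by omega) (by omega)]
        simp only [List.foldl_cons]
        have : pvStep ([], i) num = (([] : List String) ++ ["\n"], 1) := by
          simp [pvStep, hi]
        rw [this, List.nil_append, show (["\n"] : List String) = ["\n"] ++ [] from rfl,
          pvFoldl_acc]
        simp [pvJoin_cons, String.append_assoc]
      · rw [if_neg hi]
        rw [ih (num + 1) (by omega) (by omega)]
        simp only [List.foldl_cons]
        have : pvStep ([], i) num =
            (([] : List String) ++ [PySem.Int.toStr num ++ "-" ++ pyChr num ++ " "], i + 1) := by
          simp [pvStep, hi]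
        rw [this, List.nil_append,
          show ([PySem.Int.toStr num ++ "-" ++ pyChr num ++ " "] : List String)
              = [PySem.Int.toStr num ++ "-" ++ pyChr num ++ " "] ++ [] from rfl,
          pvFoldl_acc]
        simp [pvJoin_cons, String.append_assoc]

lemma pvAlt_eq (text : String) (num i : Int) :
    show_ascii_alt text num i =
      text ++ PySem.Str.join "" (((PySem.List.pyRange num 127 1).foldl pvStep ([], i)).1) := by
  have h0 : show_ascii_alt text num i =
      PySem.Str.join "" (((PySem.List.pyRange num 127 1).foldl pvStep ([text], i)).1) := rfl
  rw [h0, show (([text], i) : List String × Int) = ([text] ++ [], i) from by simp,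
    pvFoldl_acc]
  simp [pvJoin_cons]

-- ===== VERDICT (by name: the statement is the Claim_ definition above) =====
theorem show_ascii_spec : Claim_equal_show_ascii := by
  intro text num i _ hpre
  unfold Spec_show_ascii
  rw [pvAlt_eq, pvMain (127 - num).toNat num (le_refl _) hpre.1]
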